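-- pv_equiv track=rewrite | github.com/FranRovi/Algorithms | HackerRank/Easy/jimAndTheOrders.py | jimOrders
-- ===== SOURCE A (Python) =====
-- def jimOrders(orders):
--     hash_orders = {}
--     for i in range(len(orders)):
--         if orders[i][0] + orders[i][1]  not in hash_orders:
--             hash_orders[orders[i][0] + orders[i][1]] = [i + 1]
--         else:
--             hash_orders[orders[i][0] + orders[i][1]].append(i + 1)
--     sorted_hash_orders_tuple = sorted(hash_orders.items())
--     sorted_dict = dict(sorted_hash_orders_tuple)
--     customer_arr = list(sorted_dict.values())
--     answer = []
--     for j in range(len(customer_arr)):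
--         for k in range(len(customer_arr[j])):
--             answer.append(customer_arr[j][k])
--     return answer
-- ===== SOURCE B (Python) =====
-- def jimOrders(orders):
--     return [i for _t, i in sorted((order[0] + order[1], i) for i, order in enumerate(orders, 1))]
-- ===== Notes on version B (the rewrite author's own statement) =====
-- stated objective: simpler
-- what changed: Replaced the dict-grouping, key-sort of dict items, dict reconstruction and nested flatten loop by a single decorate-sort-undecorate one-liner: sort the (completion time, 1-based index) pairs and project out the indices, relying on tuple ordering for tie-breaking.
import Mathlib
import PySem

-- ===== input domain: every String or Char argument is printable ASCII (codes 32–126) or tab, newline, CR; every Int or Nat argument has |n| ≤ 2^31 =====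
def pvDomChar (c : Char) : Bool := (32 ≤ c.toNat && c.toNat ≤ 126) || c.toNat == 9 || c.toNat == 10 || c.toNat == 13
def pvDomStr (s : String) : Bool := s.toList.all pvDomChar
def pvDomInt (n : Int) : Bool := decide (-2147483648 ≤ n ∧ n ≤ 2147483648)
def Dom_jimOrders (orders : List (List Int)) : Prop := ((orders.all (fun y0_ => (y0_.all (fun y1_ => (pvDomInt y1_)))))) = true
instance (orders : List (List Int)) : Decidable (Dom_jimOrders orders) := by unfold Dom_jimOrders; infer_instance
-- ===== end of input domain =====

-- B replaces A's dict-grouping + item-sort + dict rebuild + nested flatten by one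
-- decorate-sort-undecorate pass over (completion time, index) pairs (objective: simpler).

-- ===== PORT A =====
-- the grouping loop: for i in range(len(orders)): bucket i+1 under orders[i][0] + orders[i][1]
def jimOrdersDict (orders : List (List Int)) : PySem.Dict Int (List Int) :=
  (PySem.List.enumerate orders 0).foldl
    (fun d p =>
      let k := PySem.List.pyGetD p.2 0 0 + PySem.List.pyGetD p.2 1 0
      match d.get? k with
      | none   => d.insert k [p.1 + 1]
      | some l => d.insert k (l ++ [p.1 + 1]))
    PySem.Dict.empty

def jimOrders (orders : List (List Int)) : List Int :=
  -- sorted(hash_orders.items()): dict keys are distinct, so Python's tuple sort never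
  -- reaches the second components — sorting by the first component is exact here
  let sortedItems := PySem.List.sorted (jimOrdersDict orders).items (fun p => p.1)
  -- dict(sorted_...) reinserts the distinct keys in this order, so list(….values()) is:
  let customer_arr := sortedItems.map (fun p => p.2)
  -- the nested append loop
  customer_arr.foldl (fun answer row => row.foldl (fun a v => a ++ [v]) answer) []

-- ===== PORT B =====
def jimOrders_alt (orders : List (List Int)) : List Int :=
  (PySem.List.sorted2
      ((PySem.List.enumerate orders 1).map
        (fun p => (PySem.List.pyGetD p.2 0 0 + PySem.List.pyGetD p.2 1 0, p.1)))
      (fun q => q.1) (fun q => q.2)).map (fun q => q.2)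

-- ===== PRECONDITION & SPEC =====
-- Pre_ excludes exactly the inputs where some order has fewer than two entries: there the
-- Python A (and B alike) raises IndexError on orders[i][0] / orders[i][1].
def Pre_jimOrders (orders : List (List Int)) : Prop := ∀ o ∈ orders, 2 ≤ o.length
instance (orders : List (List Int)) : Decidable (Pre_jimOrders orders) := by
  unfold Pre_jimOrders; infer_instance
def pvWitness_jimOrders : List (List Int) := [[1, 2], [3, 1], [0, 4]]
def Spec_jimOrders (orders : List (List Int)) (out : List Int) : Prop := out = jimOrders_alt orders
instance (orders : List (List Int)) (out : List Int) : Decidable (Spec_jimOrders orders out) := by unfold Spec_jimOrders; infer_instance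

-- ===== CLAIM (what is proved, stated in full; the proofs are below) =====
def Claim_equal_jimOrders : Prop := ∀ (orders : List (List Int)), Dom_jimOrders orders → Pre_jimOrders orders → Spec_jimOrders orders (jimOrders orders)

-- ===== LEMMAS AND PROOFS =====

-- the completion time of one order and the decorated (time, 1-based index) list
def pvKey (o : List Int) : Int := PySem.List.pyGetD o 0 0 + PySem.List.pyGetD o 1 0
def pvPairs (orders : List (List Int)) : List (Int × Int) :=
  (PySem.List.enumerate orders 1).map (fun p => (pvKey p.2, p.1))
def pvBucket (qs : List (Int × Int)) (k : Int) : List Int :=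
  (qs.filter (fun q => q.1 == k)).map (fun q => q.2)

lemma pv_enum_shift {α : Type} (xs : List α) (s : Int) :
    PySem.List.enumerate xs (s + 1) =
      (PySem.List.enumerate xs s).map (fun p => (p.1 + 1, p.2)) := by
  induction xs generalizing s with
  | nil => simp [PySem.List.enumerate_nil]
  | cons x xs ih =>
      simp [PySem.List.enumerate_cons, ih]

lemma pv_step_modify (d : PySem.Dict Int (List Int)) (k : Int) (v : Int) :
    (match d.get? k with
     | none   => d.insert k [v]
     | some l => d.insert k (l ++ [v])) = d.modify k [] (· ++ [v]) := by
  cases h : d.get? k <;>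
    simp [PySem.Dict.modify, PySem.Dict.getD_eq_get?_getD, h]

lemma pv_dict_eq (orders : List (List Int)) :
    jimOrdersDict orders =
      (pvPairs orders).foldl (fun d p => d.modify p.1 [] (· ++ [p.2])) PySem.Dict.empty := by
  unfold jimOrdersDict pvPairs
  rw [show (1 : Int) = 0 + 1 by norm_num, pv_enum_shift, List.map_map, List.foldl_map]
  congr 1
  funext d p
  simp only [Function.comp]
  simpa [pvKey] using pv_step_modify d (pvKey p.2) (p.1 + 1)

lemma pv_keys_eq (orders : List (List Int)) :
    (jimOrdersDict orders).keys = PySem.Set.ofList ((pvPairs orders).map (fun q => q.1)) := by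
  rw [pv_dict_eq]
  have h := PySem.Dict.keys_foldl_modify_key (pvPairs orders) (fun q => q.1) []
    (fun _ p => (· ++ [p.2])) PySem.Dict.empty
  simpa [PySem.Set.update, PySem.Set.ofList, PySem.Dict.keys_empty, PySem.Set.empty] using h

lemma pv_nodup_keys (orders : List (List Int)) : (jimOrdersDict orders).keys.Nodup := by
  rw [pv_dict_eq]
  exact PySem.Dict.nodup_keys_foldl_modify_key (pvPairs orders) (fun q => q.1) []
    (fun _ p => (· ++ [p.2])) PySem.Dict.empty (by simp [PySem.Dict.keys_empty])

lemma pv_getD_eq (orders : List (List Int)) (c : Int) :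
    (jimOrdersDict orders).getD c [] = pvBucket (pvPairs orders) c := by
  rw [pv_dict_eq]
  simpa [pvBucket, PySem.Dict.getD_empty] using
    PySem.Dict.getD_foldl_modify_append (pvPairs orders) PySem.Dict.empty c

lemma pv_items_eq (orders : List (List Int)) :
    (jimOrdersDict orders).items =
      (jimOrdersDict orders).keys.map (fun k => (k, pvBucket (pvPairs orders) k)) := by
  rw [PySem.Dict.items_eq_map_keys _ (pv_nodup_keys orders) []]
  exact List.map_congr_left (fun k _ => by rw [pv_getD_eq])

-- sorted items by their first components = the sorted distinct keys, decorated with buckets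
lemma pv_sortedItems (orders : List (List Int)) :
    PySem.List.sorted (jimOrdersDict orders).items (fun p => p.1) =
      (PySem.List.sorted (PySem.Set.ofList ((pvPairs orders).map (fun q => q.1)))
          (fun x => x)).map (fun k => (k, pvBucket (pvPairs orders) k)) := by
  apply PySem.List.sorted_eq_of_perm_of_pairwise_lt
  · rw [pv_items_eq, pv_keys_eq]
    exact (PySem.List.sorted_perm _ _ _).map _
  · have h := PySem.List.sorted_ofList_pairwise_lt ((pvPairs orders).map (fun q => q.1))
    rw [List.pairwise_map]
    exact h

-- A's result as a flatMap of buckets over the sorted distinct keys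
lemma pv_A_eq (orders : List (List Int)) :
    jimOrders orders =
      (PySem.List.sorted (PySem.Set.ofList ((pvPairs orders).map (fun q => q.1)))
          (fun x => x)).flatMap (fun k => pvBucket (pvPairs orders) k) := by
  unfold jimOrders
  rw [pv_sortedItems]
  have hrow : (fun (answer : List Int) (row : List Int) =>
      row.foldl (fun a v => a ++ [v]) answer) = fun answer row => answer ++ row := by
    funext answer row
    exact PySem.List.foldl_append_singleton row answer
  rw [hrow, List.foldl_map, List.foldl_map]
  exact PySem.List.foldl_append_eq_flatMap _ _ []

-- sorted2 with two Int keys is sorting by the lexicographic pair key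
lemma pv_sorted2_toLex (xs : List (Int × Int)) :
    PySem.List.sorted2 xs (fun q => q.1) (fun q => q.2) =
      PySem.List.sorted xs (fun q => toLex (q.1, q.2)) := by
  show List.foldl _ [] xs = List.foldl _ [] xs
  have hb : (fun (a b : Int × Int) =>
        (decide (a.1 < b.1) || (!decide (b.1 < a.1) && decide (a.2 < b.2)))) =
      fun a b => decide (toLex (a.1, a.2) < toLex (b.1, b.2)) := by
    funext a b
    rw [Bool.eq_iff_iff]
    simp only [Bool.or_eq_true, Bool.and_eq_true, Bool.not_eq_eq_eq_not, Bool.not_true,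
      decide_eq_true_eq, decide_eq_false_iff_not, Prod.Lex.toLex_lt_toLex]
    omega
  simp only [if_neg (by decide : ¬ (false = true))]
  rw [hb]

lemma pv_blocks_perm (ks : List Int) (qs : List (Int × Int)) (hnd : ks.Nodup)
    (hcov : ∀ q ∈ qs, q.1 ∈ ks) :
    (ks.flatMap (fun k => qs.filter (fun q => q.1 == k))).Perm qs := by
  induction ks generalizing qs with
  | nil =>
      cases qs with
      | nil => simp
      | cons q qs => exact absurd (hcov q (by simp)) (by simp)
  | cons k ks ih =>
      simp only [List.flatMap_cons]
      have hstep : ∀ k' ∈ ks, qs.filter (fun q => q.1 == k') =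
          (qs.filter (fun q => !(q.1 == k))).filter (fun q => q.1 == k') := by
        intro k' hk'
        rw [List.filter_filter]
        apply List.filter_congr
        intro q _
        by_cases hq : q.1 = k'
        · have : k' ≠ k := by rintro rfl; exact (List.nodup_cons.mp hnd).1 hk'
          simp [hq, this]
        · simp [hq]
      have hflat : ks.flatMap (fun k' => qs.filter (fun q => q.1 == k')) =
          ks.flatMap (fun k' => (qs.filter (fun q => !(q.1 == k))).filter (fun q => q.1 == k')) := by
        rw [List.flatMap_def, List.flatMap_def, List.map_congr_left hstep]
      rw [hflat]
      have hcov' : ∀ q ∈ qs.filter (fun q => !(q.1 == k)), q.1 ∈ ks := by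
        intro q hq
        have hmem := List.mem_of_mem_filter hq
        have hne : ¬ (q.1 == k) = true := by
          have := List.of_mem_filter hq; simpa using this
        rcases List.mem_cons.mp (hcov q hmem) with h | h
        · exact absurd (by simpa using h) (by simpa using hne)
        · exact h
      have hperm := ih (qs.filter (fun q => !(q.1 == k))) (List.nodup_cons.mp hnd).2 hcov'
      exact (hperm.append_left _).trans (List.filter_append_perm _ qs)

lemma pv_blocks_pairwise (ks : List Int) (qs : List (Int × Int))
    (hks : ks.Pairwise (· < ·)) (hq : qs.Pairwise (fun a b => a.2 < b.2)) :
    (ks.flatMap (fun k => qs.filter (fun q => q.1 == k))).Pairwise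
      (fun a b => a.1 < b.1 ∨ (a.1 = b.1 ∧ a.2 < b.2)) := by
  induction ks with
  | nil => simp
  | cons k ks ih =>
      simp only [List.flatMap_cons]
      rw [List.pairwise_append]
      refine ⟨?_, ih (List.pairwise_cons.mp hks).2, ?_⟩
      · refine List.Pairwise.imp_of_mem ?_ (hq.filter _)
        intro a b ha hb hab
        have h1 : a.1 = k := by simpa using List.of_mem_filter ha
        have h2 : b.1 = k := by simpa using List.of_mem_filter hb
        exact Or.inr ⟨h1.trans h2.symm, hab⟩
      · intro a ha b hb
        have h1 : a.1 = k := by simpa using List.of_mem_filter ha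
        rcases List.mem_flatMap.mp hb with ⟨k', hk', hbk'⟩
        have h2 : b.1 = k' := by simpa using List.of_mem_filter hbk'
        have hkk' : k < k' := (List.pairwise_cons.mp hks).1 k' hk'
        exact Or.inl (by rw [h1, h2]; exact hkk')

lemma pv_pairs_snd_pairwise (orders : List (List Int)) :
    (pvPairs orders).Pairwise (fun a b => a.2 < b.2) := by
  unfold pvPairs
  rw [List.pairwise_map]
  have h : (List.map (fun x => x.1) (PySem.List.enumerate orders 1)).Pairwise (· < ·) := by
    rw [PySem.List.map_fst_enumerate]
    exact PySem.List.pairwise_lt_pyRange_one 1 _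
  exact List.pairwise_map.mp h

-- B's sort equals the same flatMap of buckets over the sorted distinct keys
lemma pv_B_eq (orders : List (List Int)) :
    jimOrders_alt orders =
      (PySem.List.sorted (PySem.Set.ofList ((pvPairs orders).map (fun q => q.1)))
          (fun x => x)).flatMap (fun k => pvBucket (pvPairs orders) k) := by
  unfold jimOrders_alt
  have hps : (PySem.List.enumerate orders 1).map
      (fun p => (PySem.List.pyGetD p.2 0 0 + PySem.List.pyGetD p.2 1 0, p.1)) = pvPairs orders := rfl
  rw [hps, pv_sorted2_toLex]
  set ks := PySem.List.sorted (PySem.Set.ofList ((pvPairs orders).map (fun q => q.1)))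
      (fun x => x) with hks
  have hsorted : PySem.List.sorted (pvPairs orders) (fun q => toLex (q.1, q.2)) =
      ks.flatMap (fun k => (pvPairs orders).filter (fun q => q.1 == k)) := by
    apply PySem.List.sorted_eq_of_perm_of_pairwise_lt
    · apply pv_blocks_perm
      · exact ((PySem.List.sorted_perm _ _ _).nodup_iff).mpr (PySem.Set.nodup_ofList _)
      · intro q hq
        rw [hks, PySem.List.mem_sorted, PySem.Set.mem_ofList]
        exact List.mem_map_of_mem hq
    · have h := pv_blocks_pairwise ks (pvPairs orders)
        (by rw [hks]; exact PySem.List.sorted_ofList_pairwise_lt _)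
        (pv_pairs_snd_pairwise orders)
      exact h.imp (fun hab => Prod.Lex.toLex_lt_toLex.mpr hab)
  rw [hsorted, List.map_flatMap]
  rfl

-- ===== VERDICT (by name: the statement is the Claim_ definition above) =====
theorem jimOrders_spec : Claim_equal_jimOrders := by
  intro orders _ _
  unfold Spec_jimOrders
  rw [pv_A_eq, pv_B_eq]
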